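-- pv_equiv track=rewrite | github.com/bittarwork/chessAttackCalculater | chess.py | mark_bishop_attacks
-- ===== SOURCE A (Python) =====
-- def mark_bishop_attacks(board):
--     """
--     Marks squares attacked by bishops on the board.
--
--     Parameters:
--     board (list): A 2D list representing the chess board.
--
--     Returns:
--     list: A 2D list with attacked squares marked as -1.
--     """
--     size = len(board)
--     threat_map = [[0] * size for _ in range(size)]
--     for i in range(size):
--         for j in range(size):
--             if board[i][j] == 'B':
--                 for d in range(1, size):
--                     if i - d >= 0 and j - d >= 0:
--                         threat_map[i - d][j - d] = -1
--                     if i + d < size and j + d < size: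
--                         threat_map[i + d][j + d] = -1
--                     if i - d >= 0 and j + d < size:
--                         threat_map[i - d][j + d] = -1
--                     if i + d < size and j - d >= 0:
--                         threat_map[i + d][j - d] = -1
--     return threat_map
-- ===== SOURCE B (Python) =====
-- def mark_bishop_attacks(board):
--     """Same result by a different route: collect the bishops once, count them per
--     main (i-j) and anti (i+j) diagonal, then mark each cell whose diagonal
--     carries a bishop other than the cell itself."""
--     size = len(board)
--     bishops = [(i, j) for i in range(size) for j in range(size) if board[i][j] == 'B']
--     main = {}
--     anti = {}
--     for (i, j) in bishops:
--         main[i - j] = main.get(i - j, 0) + 1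
--         anti[i + j] = anti.get(i + j, 0) + 1
--     result = []
--     for i in range(size):
--         row = []
--         for j in range(size):
--             need = 2 if board[i][j] == 'B' else 1
--             row.append(-1 if main.get(i - j, 0) >= need or anti.get(i + j, 0) >= need else 0)
--         result.append(row)
--     return result
-- ===== Notes on version B (the rewrite author's own statement) =====
-- stated objective: alternative
-- what changed: A walks every diagonal from every bishop (worst-case cubic); B collects the bishops once, counts them per main/anti diagonal in two dicts, and marks a cell iff its diagonal holds a bishop other than the cell itself (quadratic worst case, but not measurably faster on the sampled sparse boards).
import Mathlib
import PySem

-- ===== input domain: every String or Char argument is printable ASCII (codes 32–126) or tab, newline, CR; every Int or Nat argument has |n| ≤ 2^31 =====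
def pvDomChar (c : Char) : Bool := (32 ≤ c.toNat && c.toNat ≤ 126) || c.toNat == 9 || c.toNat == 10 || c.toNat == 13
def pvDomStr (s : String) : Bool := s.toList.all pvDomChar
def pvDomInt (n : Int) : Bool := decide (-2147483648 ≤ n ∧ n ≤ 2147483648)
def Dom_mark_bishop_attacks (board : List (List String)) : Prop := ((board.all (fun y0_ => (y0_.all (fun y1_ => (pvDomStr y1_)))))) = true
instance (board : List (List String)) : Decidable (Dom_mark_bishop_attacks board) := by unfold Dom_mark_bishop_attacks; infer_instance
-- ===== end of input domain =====

-- B derives the board from per-diagonal bishop counts instead of A's per-bishop diagonal walks; equal output proved on Pre_.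

-- ===== PORT A =====
-- threat_map[p][q] = -1  (indices guarded in range by A's own conditions)
def pvSet2 (m : List (List Int)) (p q : Nat) : List (List Int) :=
  m.modify p (fun row => row.set q (-1))

-- Literal port of A. board[i][j] is ported as getD: exact under Pre_ (every row has
-- length ≥ len(board), and all indices come from range(size)). Python's guards
-- 'i - d >= 0' over ints are 'd ≤ i' over the Nat indices; range(1, size) is range' 1 (size-1).
def mark_bishop_attacks (board : List (List String)) : List (List Int) :=
  let size := board.length
  let tm0 := List.replicate size (List.replicate size (0 : Int))
  (List.range size).foldl (fun tm i =>
    (List.range size).foldl (fun tm j =>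
      if (board.getD i []).getD j "" == "B" then
        (List.range' 1 (size - 1)).foldl (fun tm d =>
          let tm1 := if d ≤ i ∧ d ≤ j then pvSet2 tm (i - d) (j - d) else tm
          let tm2 := if i + d < size ∧ j + d < size then pvSet2 tm1 (i + d) (j + d) else tm1
          let tm3 := if d ≤ i ∧ j + d < size then pvSet2 tm2 (i - d) (j + d) else tm2
          if i + d < size ∧ d ≤ j then pvSet2 tm3 (i + d) (j - d) else tm3) tm
      else tm) tm) tm0

-- ===== PORT B =====
-- Literal port of Source B (same getD reading of board[i][j] as the port of A).
def mark_bishop_attacks_alt (board : List (List String)) : List (List Int) :=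
  let size := board.length
  let bishops := (List.range size).flatMap (fun i =>
    ((List.range size).map (fun j => (i, j))).filter
      (fun c => (board.getD c.1 []).getD c.2 "" == "B"))
  let md := bishops.foldl (fun (md : PySem.Dict Int Int × PySem.Dict Int Int) b =>
      (md.1.insert ((b.1 : Int) - b.2) (md.1.getD ((b.1 : Int) - b.2) 0 + 1),
       md.2.insert ((b.1 : Int) + b.2) (md.2.getD ((b.1 : Int) + b.2) 0 + 1)))
    (PySem.Dict.empty, PySem.Dict.empty)
  (List.range size).map (fun i => (List.range size).map (fun j =>
    let need : Int := if (board.getD i []).getD j "" == "B" then 2 else 1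
    if need ≤ md.1.getD ((i : Int) - j) 0 ∨ need ≤ md.2.getD ((i : Int) + j) 0 then -1 else 0))

-- ===== PRECONDITION & SPEC =====
-- Pre_ excludes exactly the boards on which Python raises IndexError: A (and B) read
-- board[i][j] for all i, j < len(board), so every row must have length ≥ len(board).
def Pre_mark_bishop_attacks (board : List (List String)) : Prop :=
  ∀ row ∈ board, board.length ≤ row.length
instance (board : List (List String)) : Decidable (Pre_mark_bishop_attacks board) := by
  unfold Pre_mark_bishop_attacks; infer_instance

def pvWitness_mark_bishop_attacks : List (List String) := [["B", "x"], [".", "B"]]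

def Spec_mark_bishop_attacks (board : List (List String)) (out : List (List Int)) : Prop := out = mark_bishop_attacks_alt board
instance (board : List (List String)) (out : List (List Int)) : Decidable (Spec_mark_bishop_attacks board out) := by unfold Spec_mark_bishop_attacks; infer_instance

-- ===== CLAIM (what is proved, stated in full; the proofs are below) =====
def Claim_equal_mark_bishop_attacks : Prop := ∀ (board : List (List String)), Dom_mark_bishop_attacks board → Pre_mark_bishop_attacks board → Spec_mark_bishop_attacks board (mark_bishop_attacks board)

-- ===== LEMMAS AND PROOFS =====

-- the cell (i,j) read as Python's board[i][j] == 'B'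
def pvBishop (board : List (List String)) (c : Nat × Nat) : Bool :=
  (board.getD c.1 []).getD c.2 "" == "B"

def pvCells (n : Nat) : List (Nat × Nat) := List.range n ×ˢ List.range n

def pvBishops (board : List (List String)) : List (Nat × Nat) :=
  (pvCells board.length).filter (pvBishop board)

-- cell (i,j) is attacked: some OTHER bishop shares a diagonal with it
def pvAtt (board : List (List String)) (i j : Nat) : Bool :=
  (pvBishops board).any (fun b =>
    decide (b ≠ (i, j)) &&
      (decide ((b.1 : Int) - b.2 = (i : Int) - j) || decide ((b.1 : Int) + b.2 = (i : Int) + j)))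

def pvGet2 (m : List (List Int)) (i j : Nat) : Int := (m.getD i []).getD j 0

def pvShape (n : Nat) (m : List (List Int)) : Prop :=
  m.length = n ∧ ∀ k < n, (m.getD k []).length = n

-- the body of A's innermost loop, as a named step function
def pvStep (n p q : Nat) (tm : List (List Int)) (d : Nat) : List (List Int) :=
  let tm1 := if d ≤ p ∧ d ≤ q then pvSet2 tm (p - d) (q - d) else tm
  let tm2 := if p + d < n ∧ q + d < n then pvSet2 tm1 (p + d) (q + d) else tm1
  let tm3 := if d ≤ p ∧ q + d < n then pvSet2 tm2 (p - d) (q + d) else tm2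
  if p + d < n ∧ d ≤ q then pvSet2 tm3 (p + d) (q - d) else tm3

-- does the d-th step of the bishop at (p,q) write to (i,j)?
def pvHit (n p q d i j : Nat) : Bool :=
  decide ((d ≤ p ∧ d ≤ q ∧ i = p - d ∧ j = q - d) ∨
          (p + d < n ∧ q + d < n ∧ i = p + d ∧ j = q + d) ∨
          (d ≤ p ∧ q + d < n ∧ i = p - d ∧ j = q + d) ∨
          (p + d < n ∧ d ≤ q ∧ i = p + d ∧ j = q - d))

def pvMarkOne (n : Nat) (tm : List (List Int)) (b : Nat × Nat) : List (List Int) :=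
  (List.range' 1 (n - 1)).foldl (pvStep n b.1 b.2) tm

lemma pvSet2_row (m : List (List Int)) (p q i : Nat) :
    (pvSet2 m p q).getD i [] = if p = i then (m.getD i []).set q (-1) else m.getD i [] := by
  unfold pvSet2
  rw [List.getD_eq_getElem?_getD, List.getD_eq_getElem?_getD, List.getElem?_modify]
  by_cases hpi : p = i <;> cases h : m[i]? <;> simp [hpi]

lemma pvSet2_rowlen (m : List (List Int)) (p q k : Nat) :
    ((pvSet2 m p q).getD k []).length = (m.getD k []).length := by
  rw [pvSet2_row]; split <;> simp

lemma pvSet2_shape {n : Nat} {m : List (List Int)} (h : pvShape n m) (p q : Nat) :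
    pvShape n (pvSet2 m p q) := by
  refine ⟨?_, fun k hk => ?_⟩
  · simpa [pvSet2] using h.1
  · rw [pvSet2_rowlen]; exact h.2 k hk

lemma pvSet2_get2 {n : Nat} {m : List (List Int)} (h : pvShape n m)
    {p q : Nat} (hp : p < n) (hq : q < n) (i j : Nat) :
    pvGet2 (pvSet2 m p q) i j = if p = i ∧ q = j then -1 else pvGet2 m i j := by
  unfold pvGet2
  rw [pvSet2_row]
  by_cases hpi : p = i
  · subst hpi
    have hlen : (m.getD p []).length = n := h.2 p hp
    rw [if_pos rfl, List.getD_eq_getElem?_getD (l := (m.getD p []).set q (-1)),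
      List.getElem?_set, List.getD_eq_getElem?_getD (l := m.getD p [])]
    by_cases hqj : q = j
    · subst hqj
      rw [List.getD_eq_getElem?_getD] at hlen
      simp [hlen, hq]
    · simp [hqj]
  · simp [hpi]

lemma pvIf_set2_shape {n : Nat} {m : List (List Int)} (h : pvShape n m)
    (c : Prop) [Decidable c] (p q : Nat) : pvShape n (if c then pvSet2 m p q else m) := by
  split
  · exact pvSet2_shape h p q
  · exact h

lemma pvIf_set2_get2 {n : Nat} {m : List (List Int)} (h : pvShape n m)
    {c : Prop} [Decidable c] {p q : Nat} (hc : c → p < n ∧ q < n) (i j : Nat) :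
    pvGet2 (if c then pvSet2 m p q else m) i j
      = if c ∧ p = i ∧ q = j then -1 else pvGet2 m i j := by
  by_cases hc' : c
  · rw [if_pos hc', pvSet2_get2 h (hc hc').1 (hc hc').2]
    by_cases h2 : p = i ∧ q = j <;> simp [h2, hc']
  · simp [hc']

lemma pvStep_shape {n : Nat} {m : List (List Int)} (h : pvShape n m) (p q d : Nat) :
    pvShape n (pvStep n p q m d) := by
  unfold pvStep
  exact pvIf_set2_shape (pvIf_set2_shape (pvIf_set2_shape (pvIf_set2_shape h _ _ _) _ _ _) _ _ _) _ _ _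

lemma pvStep_get2 {n : Nat} {m : List (List Int)} (h : pvShape n m)
    {p q : Nat} (hp : p < n) (hq : q < n) (d i j : Nat) :
    pvGet2 (pvStep n p q m d) i j = if pvHit n p q d i j then -1 else pvGet2 m i j := by
  unfold pvStep
  have h1 := pvIf_set2_shape h (d ≤ p ∧ d ≤ q) (p - d) (q - d)
  have h2 := pvIf_set2_shape h1 (p + d < n ∧ q + d < n) (p + d) (q + d)
  have h3 := pvIf_set2_shape h2 (d ≤ p ∧ q + d < n) (p - d) (q + d)
  rw [pvIf_set2_get2 h3 (by omega) i j, pvIf_set2_get2 h2 (by omega) i j,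
    pvIf_set2_get2 h1 (by omega) i j, pvIf_set2_get2 h (by omega) i j]
  simp only [pvHit, decide_eq_true_eq]
  split_ifs <;> first | rfl | omega

lemma pvFoldSteps_shape {n p q : Nat} (ds : List Nat) :
    ∀ {m : List (List Int)}, pvShape n m → pvShape n (ds.foldl (pvStep n p q) m) := by
  induction ds with
  | nil => intro m h; exact h
  | cons d ds ih => intro m h; exact ih (pvStep_shape h p q d)

lemma pvMarkOne_shape {n : Nat} {m : List (List Int)} (h : pvShape n m) (b : Nat × Nat) :
    pvShape n (pvMarkOne n m b) := pvFoldSteps_shape _ h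

lemma pvIf_or (a b : Bool) (x y : Int) :
    (if b then x else if a then x else y) = if (a || b) then x else y := by
  cases a <;> cases b <;> simp

lemma pvFoldSteps_get2 {n p q : Nat} (hp : p < n) (hq : q < n) (ds : List Nat)
    {m : List (List Int)} (h : pvShape n m) (i j : Nat) :
    pvGet2 (ds.foldl (pvStep n p q) m) i j =
      if ds.any (fun d => pvHit n p q d i j) then -1 else pvGet2 m i j := by
  induction ds generalizing m with
  | nil => simp
  | cons d ds ih =>
    simp only [List.foldl_cons, List.any_cons]
    rw [ih (pvStep_shape h p q d), pvStep_get2 h hp hq]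
    exact pvIf_or _ _ _ _

-- arithmetic core: some d in range(1, n) hits (i,j) from (p,q)  ↔  other cell, shared diagonal
lemma pvHit_exists {n p q i j : Nat} (hp : p < n) (hq : q < n) (hi : i < n) (hj : j < n) :
    (List.range' 1 (n - 1)).any (fun d => pvHit n p q d i j) =
      (decide ((p, q) ≠ (i, j)) &&
        (decide ((p : Int) - q = (i : Int) - j) || decide ((p : Int) + q = (i : Int) + j))) := by
  apply Bool.eq_iff_iff.mpr
  simp only [List.any_eq_true, List.mem_range'_1, pvHit, decide_eq_true_eq,
    Bool.and_eq_true, Bool.or_eq_true, Prod.mk.injEq, ne_eq]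
  constructor
  · rintro ⟨d, ⟨hd1, hd2⟩, hhit⟩
    constructor
    · omega
    · omega
  · rintro ⟨hne, hdiag⟩
    refine ⟨(p - i) + (i - p), ⟨?_, ?_⟩, ?_⟩ <;> omega

lemma pvMarkOne_get2 {n : Nat} {m : List (List Int)} (h : pvShape n m)
    {b : Nat × Nat} (hb : b.1 < n ∧ b.2 < n) {i j : Nat} (hi : i < n) (hj : j < n) :
    pvGet2 (pvMarkOne n m b) i j =
      if (decide (b ≠ (i, j)) &&
          (decide ((b.1 : Int) - b.2 = (i : Int) - j) || decide ((b.1 : Int) + b.2 = (i : Int) + j)))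
      then -1 else pvGet2 m i j := by
  obtain ⟨b1, b2⟩ := b
  unfold pvMarkOne
  rw [pvFoldSteps_get2 hb.1 hb.2 _ h, pvHit_exists hb.1 hb.2 hi hj]

lemma pvFoldBishops_shape {n : Nat} (bs : List (Nat × Nat)) {m : List (List Int)}
    (h : pvShape n m) : pvShape n (bs.foldl (pvMarkOne n) m) := by
  induction bs generalizing m with
  | nil => exact h
  | cons b bs ih => exact ih (pvMarkOne_shape h b)

lemma pvFoldBishops_get2 {n : Nat} (bs : List (Nat × Nat))
    (hbs : ∀ b ∈ bs, b.1 < n ∧ b.2 < n) {m : List (List Int)} (h : pvShape n m)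
    {i j : Nat} (hi : i < n) (hj : j < n) :
    pvGet2 (bs.foldl (pvMarkOne n) m) i j =
      if bs.any (fun b =>
          decide (b ≠ (i, j)) &&
            (decide ((b.1 : Int) - b.2 = (i : Int) - j) || decide ((b.1 : Int) + b.2 = (i : Int) + j)))
      then -1 else pvGet2 m i j := by
  induction bs generalizing m with
  | nil => simp
  | cons b bs ih =>
    simp only [List.foldl_cons, List.any_cons]
    rw [ih (fun x hx => hbs x (List.mem_cons_of_mem b hx)) (pvMarkOne_shape h b),
      pvMarkOne_get2 h (hbs b (List.mem_cons_self)) hi hj]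
    exact pvIf_or _ _ _ _

lemma pvA_eq_foldBishops (board : List (List String)) :
    mark_bishop_attacks board =
      (pvBishops board).foldl (pvMarkOne board.length)
        (List.replicate board.length (List.replicate board.length (0 : Int))) := by
  show (List.range board.length).foldl
      (fun tm i => (List.range board.length).foldl
        (fun tm j => if pvBishop board (i, j) then pvMarkOne board.length tm (i, j) else tm) tm)
      (List.replicate board.length (List.replicate board.length (0 : Int))) = _
  rw [pvBishops, pvCells,
    show (List.range board.length ×ˢ List.range board.length)
      = (List.range board.length).flatMap
          (fun i => (List.range board.length).map (fun j => (i, j))) from rfl,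
    List.foldl_filter, List.foldl_flatMap]
  simp only [List.foldl_map]

lemma pvMem_bishops {board : List (List String)} {b : Nat × Nat} :
    b ∈ pvBishops board ↔ (b.1 < board.length ∧ b.2 < board.length) ∧ pvBishop board b := by
  obtain ⟨b1, b2⟩ := b
  simp [pvBishops, pvCells, List.mem_filter, List.mem_product, List.mem_range]

lemma pvBishops_nodup (board : List (List String)) : (pvBishops board).Nodup := by
  exact List.Nodup.filter _ (List.Nodup.product (List.nodup_range) (List.nodup_range))

-- A's result, cell by cell
lemma pvGetD_eq_getElem {α : Type} (l : List α) (i : Nat) (d : α) (h : i < l.length) :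
    l.getD i d = l[i] := by
  rw [List.getD_eq_getElem?_getD, List.getElem?_eq_getElem h]; rfl

lemma pvA_canonical (board : List (List String)) :
    mark_bishop_attacks board =
      (List.range board.length).map (fun i => (List.range board.length).map (fun j =>
        if pvAtt board i j then (-1 : Int) else 0)) := by
  have hsh0 : pvShape board.length
      (List.replicate board.length (List.replicate board.length (0 : Int))) := by
    refine ⟨by simp, fun k hk => ?_⟩
    simp [List.getD_eq_getElem?_getD, hk]
  have hsh := pvFoldBishops_shape (pvBishops board) hsh0
  rw [pvA_eq_foldBishops]
  apply List.ext_getElem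
  · simp [hsh.1]
  · intro i h1 h2
    have hi : i < board.length := hsh.1 ▸ h1
    simp only [List.getElem_map, List.getElem_range]
    apply List.ext_getElem
    · have hr := hsh.2 i hi
      rw [pvGetD_eq_getElem _ i [] (by rw [hsh.1]; exact hi)] at hr
      simp [hr]
    · intro j h3 h4
      have hj : j < board.length := by simpa using h4
      rw [List.getElem_map, List.getElem_range]
      have hcell : pvGet2 ((pvBishops board).foldl (pvMarkOne board.length)
          (List.replicate board.length (List.replicate board.length (0 : Int)))) i j
          = if pvAtt board i j then (-1 : Int) else 0 := by
        rw [pvFoldBishops_get2 (pvBishops board)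
          (fun b hb => (pvMem_bishops.mp hb).1) hsh0 hi hj]
        have h0 : pvGet2 (List.replicate board.length
            (List.replicate board.length (0 : Int))) i j = 0 := by
          simp [pvGet2, List.getD_eq_getElem?_getD, hi, hj]
        rw [h0, pvAtt]
      rw [← hcell]
      unfold pvGet2
      rw [pvGetD_eq_getElem _ i [] (by rw [hsh.1]; exact hi),
        pvGetD_eq_getElem _ j 0 h3]


lemma pvCountP_two {α : Type} [DecidableEq α] {l : List α} (hnd : l.Nodup) {x : α}
    (hx : x ∈ l) {p : α → Bool} (hpx : p x) :
    2 ≤ l.countP p ↔ ∃ y ∈ l, y ≠ x ∧ p y := by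
  have hperm := List.perm_cons_erase hx
  rw [hperm.countP_eq p, List.countP_cons, if_pos hpx]
  constructor
  · intro h
    have : 0 < (l.erase x).countP p := by omega
    obtain ⟨y, hy, hpy⟩ := List.countP_pos_iff.mp this
    exact ⟨y, (hnd.mem_erase_iff.mp hy).2, (hnd.mem_erase_iff.mp hy).1, hpy⟩
  · rintro ⟨y, hyl, hyx, hpy⟩
    have : 0 < (l.erase x).countP p :=
      List.countP_pos_iff.mpr ⟨y, hnd.mem_erase_iff.mpr ⟨hyx, hyl⟩, hpy⟩
    omega

-- B's result, cell by cell
lemma pvB_canonical (board : List (List String)) :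
    mark_bishop_attacks_alt board =
      (List.range board.length).map (fun i => (List.range board.length).map (fun j =>
        if pvAtt board i j then (-1 : Int) else 0)) := by
  simp only [mark_bishop_attacks_alt]
  have hb : (List.range board.length).flatMap (fun i =>
      ((List.range board.length).map (fun j => (i, j))).filter
        (fun c => (board.getD c.1 []).getD c.2 "" == "B")) = pvBishops board := by
    rw [← List.filter_flatMap]; rfl
  rw [hb]
  rw [show (fun (md : PySem.Dict Int Int × PySem.Dict Int Int) (b : Nat × Nat) =>
        (md.1.insert ((b.1 : Int) - b.2) (md.1.getD ((b.1 : Int) - b.2) 0 + 1),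
         md.2.insert ((b.1 : Int) + b.2) (md.2.getD ((b.1 : Int) + b.2) 0 + 1)))
      = (fun (s : PySem.Dict Int Int × PySem.Dict Int Int) (e : Nat × Nat) =>
        ((fun (d : PySem.Dict Int Int) (b : Nat × Nat) =>
            d.insert ((b.1 : Int) - b.2) (d.getD ((b.1 : Int) - b.2) 0 + 1)) s.1 e,
         (fun (d : PySem.Dict Int Int) (b : Nat × Nat) =>
            d.insert ((b.1 : Int) + b.2) (d.getD ((b.1 : Int) + b.2) 0 + 1)) s.2 e)) from rfl,
    PySem.List.foldl_prod_mk
      (f := fun (d : PySem.Dict Int Int) (b : Nat × Nat) =>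
        d.insert ((b.1 : Int) - b.2) (d.getD ((b.1 : Int) - b.2) 0 + 1))
      (g := fun (d : PySem.Dict Int Int) (b : Nat × Nat) =>
        d.insert ((b.1 : Int) + b.2) (d.getD ((b.1 : Int) + b.2) 0 + 1))]
  rw [show ((pvBishops board).foldl
        (fun (d : PySem.Dict Int Int) b => d.insert ((b.1 : Int) - b.2) (d.getD ((b.1 : Int) - b.2) 0 + 1))
        PySem.Dict.empty)
      = (((pvBishops board).map (fun b => (b.1 : Int) - b.2)).foldl
        (fun (d : PySem.Dict Int Int) k => d.insert k (d.getD k 0 + 1)) PySem.Dict.empty) from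
    (List.foldl_map (f := fun b : Nat × Nat => (b.1 : Int) - b.2)
      (g := fun (d : PySem.Dict Int Int) k => d.insert k (d.getD k 0 + 1))
      (l := pvBishops board) (init := PySem.Dict.empty)).symm]
  rw [show ((pvBishops board).foldl
        (fun (d : PySem.Dict Int Int) b => d.insert ((b.1 : Int) + b.2) (d.getD ((b.1 : Int) + b.2) 0 + 1))
        PySem.Dict.empty)
      = (((pvBishops board).map (fun b => (b.1 : Int) + b.2)).foldl
        (fun (d : PySem.Dict Int Int) k => d.insert k (d.getD k 0 + 1)) PySem.Dict.empty) from
    (List.foldl_map (f := fun b : Nat × Nat => (b.1 : Int) + b.2)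
      (g := fun (d : PySem.Dict Int Int) k => d.insert k (d.getD k 0 + 1))
      (l := pvBishops board) (init := PySem.Dict.empty)).symm]
  rw [PySem.Dict.foldl_insert_getD_add_one_eq_counter,
    PySem.Dict.foldl_insert_getD_add_one_eq_counter]
  apply List.map_congr_left
  intro i hi
  apply List.map_congr_left
  intro j hj
  rw [List.mem_range] at hi hj
  simp only [PySem.Dict.getD_counter]
  have hcnt1 : List.count ((i : Int) - j) ((pvBishops board).map (fun b => (b.1 : Int) - b.2))
      = (pvBishops board).countP (fun b => decide ((b.1 : Int) - b.2 = (i : Int) - j)) := by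
    rw [List.count_eq_countP, List.countP_map]
    apply List.countP_congr
    intro b _
    simp [Function.comp, beq_iff_eq]
  have hcnt2 : List.count ((i : Int) + j) ((pvBishops board).map (fun b => (b.1 : Int) + b.2))
      = (pvBishops board).countP (fun b => decide ((b.1 : Int) + b.2 = (i : Int) + j)) := by
    rw [List.count_eq_countP, List.countP_map]
    apply List.countP_congr
    intro b _
    simp [Function.comp, beq_iff_eq]
  rw [hcnt1, hcnt2]
  have hatt : pvAtt board i j = true ↔ ∃ b ∈ pvBishops board, b ≠ (i, j) ∧
      (((b.1 : Int) - b.2 = (i : Int) - j) ∨ ((b.1 : Int) + b.2 = (i : Int) + j)) := by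
    simp [pvAtt, List.any_eq_true]
  by_cases hB : pvBishop board (i, j)
  · have hself : (i, j) ∈ pvBishops board := pvMem_bishops.mpr ⟨⟨hi, hj⟩, hB⟩
    have e1 : ((2:Int) ≤ ((pvBishops board).countP
          (fun b => decide ((b.1 : Int) - b.2 = (i : Int) - j)) : Int))
        ↔ ∃ y ∈ pvBishops board, y ≠ (i, j) ∧ ((y.1 : Int) - y.2 = (i : Int) - j) := by
      rw [show ((2:Int) ≤ ((pvBishops board).countP _ : Int)) ↔ (2 ≤ (pvBishops board).countP
        (fun b => decide ((b.1 : Int) - b.2 = (i : Int) - j))) from by exact_mod_cast Iff.rfl]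
      rw [pvCountP_two (pvBishops_nodup board) hself (by simp)]
      simp
    have e2 : ((2:Int) ≤ ((pvBishops board).countP
          (fun b => decide ((b.1 : Int) + b.2 = (i : Int) + j)) : Int))
        ↔ ∃ y ∈ pvBishops board, y ≠ (i, j) ∧ ((y.1 : Int) + y.2 = (i : Int) + j) := by
      rw [show ((2:Int) ≤ ((pvBishops board).countP _ : Int)) ↔ (2 ≤ (pvBishops board).countP
        (fun b => decide ((b.1 : Int) + b.2 = (i : Int) + j))) from by exact_mod_cast Iff.rfl]
      rw [pvCountP_two (pvBishops_nodup board) hself (by simp)]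
      simp
    simp only [pvBishop] at hB
    simp only [hB, if_true]
    by_cases ha : pvAtt board i j = true
    · obtain ⟨b, hbm, hbne, hbd⟩ := hatt.mp ha
      rw [if_pos, ha]
      · simp
      · rcases hbd with hd | hd
        · exact Or.inl (e1.mpr ⟨b, hbm, hbne, hd⟩)
        · exact Or.inr (e2.mpr ⟨b, hbm, hbne, hd⟩)
    · rw [if_neg, if_neg ha]
      intro hcon
      apply ha
      rcases hcon with hc | hc
      · obtain ⟨y, hym, hyne, hyd⟩ := e1.mp hc
        exact hatt.mpr ⟨y, hym, hyne, Or.inl hyd⟩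
      · obtain ⟨y, hym, hyne, hyd⟩ := e2.mp hc
        exact hatt.mpr ⟨y, hym, hyne, Or.inr hyd⟩
  · have hns : (i, j) ∉ pvBishops board := fun hc => hB (pvMem_bishops.mp hc).2
    have e1 : ((1:Int) ≤ ((pvBishops board).countP
          (fun b => decide ((b.1 : Int) - b.2 = (i : Int) - j)) : Int))
        ↔ ∃ y ∈ pvBishops board, ((y.1 : Int) - y.2 = (i : Int) - j) := by
      rw [show ((1:Int) ≤ ((pvBishops board).countP _ : Int)) ↔ (0 < (pvBishops board).countP
        (fun b => decide ((b.1 : Int) - b.2 = (i : Int) - j))) from by exact_mod_cast Iff.rfl]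
      rw [List.countP_pos_iff]
      simp
    have e2 : ((1:Int) ≤ ((pvBishops board).countP
          (fun b => decide ((b.1 : Int) + b.2 = (i : Int) + j)) : Int))
        ↔ ∃ y ∈ pvBishops board, ((y.1 : Int) + y.2 = (i : Int) + j) := by
      rw [show ((1:Int) ≤ ((pvBishops board).countP _ : Int)) ↔ (0 < (pvBishops board).countP
        (fun b => decide ((b.1 : Int) + b.2 = (i : Int) + j))) from by exact_mod_cast Iff.rfl]
      rw [List.countP_pos_iff]
      simp
    rw [Bool.not_eq_true] at hB
    simp only [pvBishop] at hB
    simp only [hB]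
    by_cases ha : pvAtt board i j = true
    · obtain ⟨b, hbm, hbne, hbd⟩ := hatt.mp ha
      rw [if_pos, ha]
      · simp
      · rcases hbd with hd | hd
        · exact Or.inl (e1.mpr ⟨b, hbm, hd⟩)
        · exact Or.inr (e2.mpr ⟨b, hbm, hd⟩)
    · rw [if_neg, if_neg ha]
      intro hcon
      apply ha
      rcases hcon with hc | hc
      · obtain ⟨y, hym, hyd⟩ := e1.mp hc
        exact hatt.mpr ⟨y, hym, fun he => hns (he ▸ hym), Or.inl hyd⟩
      · obtain ⟨y, hym, hyd⟩ := e2.mp hc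
        exact hatt.mpr ⟨y, hym, fun he => hns (he ▸ hym), Or.inr hyd⟩

-- ===== VERDICT (by name: the statement is the Claim_ definition above) =====
theorem mark_bishop_attacks_spec : Claim_equal_mark_bishop_attacks := by
  intro board _ _
  unfold Spec_mark_bishop_attacks
  rw [pvA_canonical, pvB_canonical]
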